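-- pv_equiv track=rewrite | github.com/2hoyeong/algorithm | programmers/lv1/160586.py | solution
-- ===== SOURCE A (Python) =====
-- def solution(keymaps, targets):
--     km = {}
--     for keymap in keymaps:
--         for i, key in enumerate(keymap):
--             if key in km:
--                 km[key] = min(km[key], i + 1)
--             else:
--                 km[key] = i + 1
--
--     answer = []
--     for target in targets:
--         index = 0
--         for c in target:
--             if c in km:
--                 index += km[c]
--             else:
--                 index = -1
--                 break
--         answer.append(index)
--     return answer
-- ===== SOURCE B (Python) =====
-- def solution(keymaps, targets):
--     def cost(c):
--         occ = [i + 1 for keymap in keymaps for i, ch in enumerate(keymap) if ch == c]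
--         return min(occ) if occ else None
--
--     table = {c: cost(c) for c in dict.fromkeys(''.join(targets))}
--     answer = []
--     for target in targets:
--         costs = [table[c] for c in target]
--         answer.append(-1 if None in costs else sum(costs))
--     return answer
-- ===== Notes on version B (the rewrite author's own statement) =====
-- stated objective: alternative
-- what changed: A builds a running-min dict in one fused pass over the keymaps and walks each target with an accumulate-and-break loop; B instead iterates over the distinct target characters, collecting all occurrence positions of each across the keymaps with a comprehension and min-reducing them, then answers each target with two separate scans (None-membership test, then sum).
import Mathlib
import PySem

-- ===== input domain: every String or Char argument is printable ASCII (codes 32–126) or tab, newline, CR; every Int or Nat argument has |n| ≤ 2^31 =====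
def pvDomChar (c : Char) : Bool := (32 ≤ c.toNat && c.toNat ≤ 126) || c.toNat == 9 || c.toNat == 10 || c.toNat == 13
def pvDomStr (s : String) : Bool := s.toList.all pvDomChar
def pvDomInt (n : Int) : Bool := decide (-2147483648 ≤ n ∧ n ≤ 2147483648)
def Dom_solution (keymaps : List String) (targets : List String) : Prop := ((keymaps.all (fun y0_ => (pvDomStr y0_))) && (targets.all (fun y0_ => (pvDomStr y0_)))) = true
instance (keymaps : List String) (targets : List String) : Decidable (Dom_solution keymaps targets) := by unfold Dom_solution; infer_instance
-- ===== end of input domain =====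

-- B replaces A's fused dict-building/running-min pass and break-loop by a per-character
-- collect-all-occurrences-then-min reduction and a two-scan membership/sum per target
-- (objective: alternative decomposition; not claimed faster).

-- ===== PORT A =====
def solution (keymaps : List String) (targets : List String) : List Int :=
  let km := keymaps.foldl (fun km keymap =>
    (PySem.List.enumerate keymap.toList 0).foldl (fun km p =>
      if km.contains p.2 then km.insert p.2 (min (km.getD p.2 0) (p.1 + 1))
      else km.insert p.2 (p.1 + 1)) km) PySem.Dict.empty
  -- the 'break' is modelled by an Option state: some idx = still looping, none = broke with -1
  targets.foldl (fun answer target =>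
    answer ++ [(target.toList.foldl (fun st c =>
      match st with
      | some idx => if km.contains c then some (idx + km.getD c 0) else none
      | none => none) (some (0 : Int))).getD (-1)]) []

-- ===== PORT B =====
-- cost(c) from Source B: all occurrence positions (i+1) of c across keymaps, then min (None if absent)
def costB (keymaps : List String) (c : Char) : Option Int :=
  let occ := keymaps.flatMap (fun keymap =>
    ((PySem.List.enumerate keymap.toList 0).filter (fun p => p.2 == c)).map (fun p => p.1 + 1))
  PySem.List.min? occ (fun x => x)

-- table from Source B: cost(c) for each distinct character of ''.join(targets)
-- (''.join(targets) is ported as the flattened char lists; dict.fromkeys as PySem.List.dedup)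
def tableB (keymaps : List String) (targets : List String) : PySem.Dict Char (Option Int) :=
  (PySem.List.dedup (targets.flatMap String.toList)).foldl
    (fun d c => d.insert c (costB keymaps c)) PySem.Dict.empty

def solution_alt (keymaps : List String) (targets : List String) : List Int :=
  targets.map (fun target =>
    -- table[c]: every character of a target is a key of the table, so getD none is exact
    let costs := target.toList.map (fun c => (tableB keymaps targets).getD c none)
    if costs.contains none then -1
    -- sum(costs): every element is some _ in this branch, so summing the getD 0 values is exact
    else (costs.map (fun o => o.getD 0)).sum)

-- ===== PRECONDITION & SPEC =====
def Spec_solution (keymaps : List String) (targets : List String) (out : List Int) : Prop := out = solution_alt keymaps targets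
instance (keymaps : List String) (targets : List String) (out : List Int) : Decidable (Spec_solution keymaps targets out) := by unfold Spec_solution; infer_instance

-- ===== CLAIM (what is proved, stated in full; the proofs are below) =====
def Claim_equal_solution : Prop := ∀ (keymaps : List String) (targets : List String), Dom_solution keymaps targets → Spec_solution keymaps targets (solution keymaps targets)

-- ===== LEMMAS AND PROOFS =====

-- option-min: minimum of two optional values, none = "no value yet"
def omin (a b : Option Int) : Option Int :=
  match a, b with
  | none, b => b
  | a, none => a
  | some x, some y => some (min x y)

theorem omin_none_left (b : Option Int) : omin none b = b := rfl

theorem omin_none_right (a : Option Int) : omin a none = a := by cases a <;> rfl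

theorem omin_assoc (a b c : Option Int) : omin (omin a b) c = omin a (omin b c) := by
  cases a <;> cases b <;> cases c <;> simp [omin, min_assoc]

-- minimum of (i+1) over the pairs (i, ch) with ch = c
def minOcc (c : Char) (ps : List (Int × Char)) : Option Int :=
  ps.foldr (fun p acc => omin (if p.2 = c then some (p.1 + 1) else none) acc) none

-- A's dict step
def stepA (d : PySem.Dict Char Int) (p : Int × Char) : PySem.Dict Char Int :=
  if d.contains p.2 then d.insert p.2 (min (d.getD p.2 0) (p.1 + 1))
  else d.insert p.2 (p.1 + 1)

theorem get?_stepA (d : PySem.Dict Char Int) (p : Int × Char) (c : Char) :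
    (stepA d p).get? c = omin (d.get? c) (if p.2 = c then some (p.1 + 1) else none) := by
  unfold stepA
  by_cases h : d.contains p.2 = true
  · have hs : (d.get? p.2).isSome = true := by
      rw [← PySem.Dict.contains_eq_isSome_get?]; exact h
    obtain ⟨v, hv⟩ := Option.isSome_iff_exists.mp hs
    by_cases hc : c = p.2
    · subst hc; simp [h, PySem.Dict.getD_eq_get?_getD, hv, omin]
    · simp [h, PySem.Dict.get?_insert, hc, Ne.symm hc, omin_none_right]
  · have h' : d.contains p.2 = false := by simpa using h
    have hn : d.get? p.2 = none := (PySem.Dict.get?_eq_none_iff_contains d p.2).mpr h'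
    by_cases hc : c = p.2
    · subst hc; simp [h', hn, omin]
    · simp [h', PySem.Dict.get?_insert, hc, Ne.symm hc, omin_none_right]

theorem get?_foldl_stepA (ps : List (Int × Char)) (d : PySem.Dict Char Int) (c : Char) :
    (ps.foldl stepA d).get? c = omin (d.get? c) (minOcc c ps) := by
  induction ps generalizing d with
  | nil => simp [minOcc, omin_none_right]
  | cons p ps ih =>
    simp only [List.foldl_cons, ih, get?_stepA, minOcc, List.foldr_cons]
    rw [omin_assoc]

theorem minOcc_append (c : Char) (xs ys : List (Int × Char)) :
    minOcc c (xs ++ ys) = omin (minOcc c xs) (minOcc c ys) := by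
  induction xs with
  | nil => simp [minOcc, omin_none_left]
  | cons x xs ih => simp only [List.cons_append, minOcc, List.foldr_cons] at *; rw [ih, omin_assoc]

-- the dict A builds, characterised as a function of the flattened (index, char) pairs
def allPairs (keymaps : List String) : List (Int × Char) :=
  keymaps.flatMap (fun k => PySem.List.enumerate k.toList 0)

theorem get?_kmA (keymaps : List String) (c : Char) :
    ((keymaps.foldl (fun km keymap =>
        (PySem.List.enumerate keymap.toList 0).foldl (fun km p =>
          if km.contains p.2 then km.insert p.2 (min (km.getD p.2 0) (p.1 + 1))
          else km.insert p.2 (p.1 + 1)) km) PySem.Dict.empty).get? c)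
      = minOcc c (allPairs keymaps) := by
  suffices h : ∀ (kms : List String) (d : PySem.Dict Char Int),
      ((kms.foldl (fun km keymap =>
        (PySem.List.enumerate keymap.toList 0).foldl stepA km) d).get? c)
        = omin (d.get? c) (minOcc c (allPairs kms)) by
    have := h keymaps PySem.Dict.empty
    simpa [stepA, PySem.Dict.get?_empty, omin_none_left] using this
  intro kms
  induction kms with
  | nil => intro d; simp [allPairs, minOcc, omin_none_right]
  | cons k kms ih =>
    intro d
    simp only [List.foldl_cons, ih, get?_foldl_stepA]
    have hAP : allPairs (k :: kms) = PySem.List.enumerate k.toList 0 ++ allPairs kms := by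
      simp [allPairs]
    rw [hAP, minOcc_append, ← omin_assoc]

-- foldr-omin form of Python's min over a nonempty/possibly-empty list
theorem foldl_min_eq_foldr_omin (t : List Int) (x : Int) :
    some (t.foldl min x) = omin (some x) (t.foldr (fun y acc => omin (some y) acc) none) := by
  induction t generalizing x with
  | nil => simp [omin]
  | cons y t ih =>
    simp only [List.foldl_cons, List.foldr_cons]
    rw [ih (min x y), ← omin_assoc]; rfl

theorem min?_eq_foldr (l : List Int) :
    PySem.List.min? l (fun x => x) = l.foldr (fun x acc => omin (some x) acc) none := by
  cases l with
  | nil => simp [PySem.List.min?]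
  | cons x t => rw [PySem.List.min?_id_cons, foldl_min_eq_foldr_omin]; rfl

theorem costB_eq_minOcc (keymaps : List String) (c : Char) :
    costB keymaps c = minOcc c (allPairs keymaps) := by
  unfold costB
  rw [min?_eq_foldr]
  rw [show keymaps.flatMap (fun keymap =>
        ((PySem.List.enumerate keymap.toList 0).filter (fun p => p.2 == c)).map (fun p => p.1 + 1))
      = ((allPairs keymaps).filter (fun p => p.2 == c)).map (fun p => p.1 + 1) by
    unfold allPairs
    induction keymaps with
    | nil => rfl
    | cons k kms ih => simp [List.flatMap_cons, List.filter_append, List.map_append, ih]]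
  generalize allPairs keymaps = ps
  induction ps with
  | nil => rfl
  | cons p ps ih =>
    by_cases h : p.2 = c <;> simp [minOcc, h, List.foldr_cons] at * <;> rw [← ih] <;> rfl

-- A's per-target break-loop equals B's membership test + sum, given the dict lookup = costB
theorem target_loop_eq (cb : Char → Option Int) (cs : List Char) (acc : Int) :
    ((cs.foldl (fun st c =>
      match st with
      | some idx => if (cb c).isSome then some (idx + (cb c).getD 0) else none
      | none => none) (some acc)).getD (-1))
      = if (cs.map cb).contains none then -1 else acc + ((cs.map cb).map (fun o => o.getD 0)).sum := by
  induction cs generalizing acc with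
  | nil => simp
  | cons c cs ih =>
    cases h : cb c with
    | some v =>
      simp only [List.foldl_cons, h, Option.isSome_some, if_true, Option.getD_some,
        List.map_cons, List.contains_cons, List.sum_cons]
      rw [ih (acc + v)]
      by_cases hm : (cs.map cb).contains none = true <;> simp [add_assoc]
    | none =>
      have hnone : ∀ (l : List Char), (l.foldl (fun st c =>
          match st with
          | some idx => if (cb c).isSome then some (idx + (cb c).getD 0) else none
          | none => none) (none : Option Int)) = none := by
        intro l; induction l with
        | nil => rfl
        | cons x l ihl => simpa using ihl
      simp [h, hnone]

theorem get?_buildTable (f : Char → Option Int) (L : List Char)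
    (d : PySem.Dict Char (Option Int)) (c : Char) :
    (L.foldl (fun d c => d.insert c (f c)) d).get? c = if c ∈ L then some (f c) else d.get? c := by
  induction L generalizing d with
  | nil => simp
  | cons x L ih =>
    simp only [List.foldl_cons, ih]
    by_cases hx : c ∈ L
    · simp [hx]
    · by_cases hcx : c = x
      · subst hcx; simp [hx, PySem.Dict.get?_insert_self]
      · simp [hx, hcx, PySem.Dict.get?_insert]

-- ===== VERDICT (by name: the statement is the Claim_ definition above) =====
theorem solution_spec : Claim_equal_solution := by
  intro keymaps targets _
  unfold Spec_solution solution solution_alt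
  rw [PySem.List.foldl_append_singleton_eq_map]
  apply List.map_congr_left
  intro target htarget
  have hmapc : target.toList.map (fun c => (tableB keymaps targets).getD c none)
      = target.toList.map (costB keymaps) := by
    apply List.map_congr_left
    intro c hc
    have hmem : c ∈ PySem.List.dedup (targets.flatMap String.toList) := by
      rw [PySem.List.mem_dedup]
      exact List.mem_flatMap.mpr ⟨target, htarget, hc⟩
    rw [tableB, PySem.Dict.getD_eq_get?_getD, get?_buildTable, if_pos hmem]
    rfl
  simp only [hmapc]
  have hkm : ∀ c : Char, (keymaps.foldl (fun km keymap =>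
      (PySem.List.enumerate keymap.toList 0).foldl (fun km p =>
        if km.contains p.2 then km.insert p.2 (min (km.getD p.2 0) (p.1 + 1))
        else km.insert p.2 (p.1 + 1)) km) PySem.Dict.empty).get? c = costB keymaps c := by
    intro c; rw [get?_kmA, costB_eq_minOcc]
  set km := keymaps.foldl (fun km keymap =>
      (PySem.List.enumerate keymap.toList 0).foldl (fun km p =>
        if km.contains p.2 then km.insert p.2 (min (km.getD p.2 0) (p.1 + 1))
        else km.insert p.2 (p.1 + 1)) km) PySem.Dict.empty with hkmdef
  have hcont : ∀ c, km.contains c = (costB keymaps c).isSome := by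
    intro c; rw [PySem.Dict.contains_eq_isSome_get?, hkm]
  have hgetD : ∀ c, km.getD c 0 = (costB keymaps c).getD 0 := by
    intro c; rw [PySem.Dict.getD_eq_get?_getD, hkm]
  simp only [hcont, hgetD]
  rw [target_loop_eq]
  simp
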